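-- pv_equiv track=rewrite | github.com/j-berg/metabonet | metabonet/metabocurator/measurement.py | determine_groups_samples
-- ===== SOURCE A (Python) =====
-- def determine_groups_samples(
--     group_one=None,
--     group_two=None,
--     samples=None
-- ):
--     """
--     Determines the samples for each group for the same patient.
--
--     arguments:
--         group_one (str): name of experimental group
--         group_two (str): name of experimental group
--         samples (list<dict<str>>): information about samples from a study
--
--     raises:
--
--     returns:
--         (dict): samples from both groups
--
--     """
--
--     groups = [group_one, group_two]
--     groups_samples = {
--         group_one: [],
--         group_two: []
--     }
--     for sample in samples:
--         identifier = sample["identifier"]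
--         group = sample["group"]
--         # Determine whether the sample belongs to a relevant group.
--         if group in groups:
--             groups_samples[group].append(identifier)
--     return groups_samples
-- ===== SOURCE B (Python) =====
-- def determine_groups_samples(
--     group_one=None,
--     group_two=None,
--     samples=None
-- ):
--     # Two independent filtering scans, one per requested group, with no
--     # accumulator dict and no mutation: each group's identifier list is
--     # computed directly by a comprehension over samples.
--     def identifiers(group):
--         return [sample["identifier"] for sample in samples
--                 if sample["group"] == group]
--     return {
--         group_one: identifiers(group_one),
--         group_two: identifiers(group_two),
--     }
-- ===== Notes on version B (the rewrite author's own statement) =====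
-- stated objective: simpler
-- what changed: B replaces A's single dispatching pass that mutates a pre-initialized two-key dict (membership test + append) with two independent, mutation-free filtering scans, one comprehension per requested group, assembled into a dict literal.
import Mathlib
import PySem

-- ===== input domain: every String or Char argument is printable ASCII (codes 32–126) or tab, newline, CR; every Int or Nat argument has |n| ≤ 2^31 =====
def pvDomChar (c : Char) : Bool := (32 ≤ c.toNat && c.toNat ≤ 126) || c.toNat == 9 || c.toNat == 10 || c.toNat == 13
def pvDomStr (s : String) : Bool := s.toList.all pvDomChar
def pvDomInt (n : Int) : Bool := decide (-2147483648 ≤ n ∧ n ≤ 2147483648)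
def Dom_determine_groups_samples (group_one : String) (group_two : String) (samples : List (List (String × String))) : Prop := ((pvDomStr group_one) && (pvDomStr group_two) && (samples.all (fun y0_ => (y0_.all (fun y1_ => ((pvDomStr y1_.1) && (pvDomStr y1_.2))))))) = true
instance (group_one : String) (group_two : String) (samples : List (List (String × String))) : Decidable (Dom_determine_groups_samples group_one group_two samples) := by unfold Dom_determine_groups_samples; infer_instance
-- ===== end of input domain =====

-- B replaces A's single dispatching pass into a mutated two-key dict with two
-- independent, mutation-free filtering scans (one per requested group)
-- assembled into a dict literal; same cost, a plainer decomposition.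


-- ===== PORT A =====
def determine_groups_samples (group_one : String) (group_two : String) (samples : List (List (String × String))) : List (String × List String) :=
  let groups : List String := [group_one, group_two]
  let groups_samples : PySem.Dict String (List String) :=
    (PySem.Dict.empty.insert group_one []).insert group_two []
  (samples.foldl (fun d sample =>
      -- sample["identifier"] / sample["group"]: KeyError when absent is excluded by Pre_
      let identifier := (PySem.Dict.mk sample).getD "identifier" ""
      let group := (PySem.Dict.mk sample).getD "group" ""
      if groups.contains group then
        d.modify group [] (fun l => l ++ [identifier])
      else d)
    groups_samples).items

-- ===== PORT B =====
def determine_groups_samples_alt (group_one : String) (group_two : String) (samples : List (List (String × String))) : List (String × List String) :=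
  -- identifiers(group) = [sample["identifier"] for sample in samples if sample["group"] == group]
  let identifiers : String → List String := fun group =>
    (samples.filter (fun sample => (PySem.Dict.mk sample).getD "group" "" == group)).map
      (fun sample => (PySem.Dict.mk sample).getD "identifier" "")
  ((PySem.Dict.empty.insert group_one (identifiers group_one)).insert
    group_two (identifiers group_two)).items

-- ===== PRECONDITION & SPEC =====
-- Pre_ excludes exactly the inputs where the Pythons raise KeyError: a sample
-- missing the "identifier" or "group" key.
def Pre_determine_groups_samples (group_one : String) (group_two : String) (samples : List (List (String × String))) : Prop :=
  ∀ sample ∈ samples, (PySem.Dict.mk sample).contains "identifier" = true ∧ (PySem.Dict.mk sample).contains "group" = true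
instance (group_one : String) (group_two : String) (samples : List (List (String × String))) : Decidable (Pre_determine_groups_samples group_one group_two samples) := by unfold Pre_determine_groups_samples; infer_instance
def pvWitness_determine_groups_samples : String × String × (List (List (String × String))) :=
  ("a", "b", [[("identifier", "s1"), ("group", "a")], [("identifier", "s2"), ("group", "c")]])

def Spec_determine_groups_samples (group_one : String) (group_two : String) (samples : List (List (String × String))) (out : List (String × List String)) : Prop := out = determine_groups_samples_alt group_one group_two samples
instance (group_one : String) (group_two : String) (samples : List (List (String × String))) (out : List (String × List String)) : Decidable (Spec_determine_groups_samples group_one group_two samples out) := by unfold Spec_determine_groups_samples; infer_instance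

-- ===== CLAIM (what is proved, stated in full; the proofs are below) =====
def Claim_equal_determine_groups_samples : Prop := ∀ (group_one : String) (group_two : String) (samples : List (List (String × String))), Dom_determine_groups_samples group_one group_two samples → Pre_determine_groups_samples group_one group_two samples → Spec_determine_groups_samples group_one group_two samples (determine_groups_samples group_one group_two samples)

-- ===== LEMMAS AND PROOFS =====

-- abbreviations used only in the proofs
def pvGrp (s : List (String × String)) : String := (PySem.Dict.mk s).getD "group" ""
def pvIdf (s : List (String × String)) : String := (PySem.Dict.mk s).getD "identifier" ""
def pvPair (s : List (String × String)) : String × String := (pvGrp s, pvIdf s)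
def pvIds (samples : List (List (String × String))) (g : String) : List String :=
  (samples.filter (fun s => pvGrp s == g)).map pvIdf

lemma pv_update_of_subset {α : Type} [BEq α] [LawfulBEq α] (s : PySem.Set α) (xs : List α)
    (h : ∀ x ∈ xs, x ∈ s) : s.update xs = s := by
  induction xs generalizing s with
  | nil => exact PySem.Set.update_nil s
  | cons x xs ih =>
      rw [PySem.Set.update_cons, PySem.Set.add_of_mem (h x (by simp))]
      exact ih s (fun y hy => h y (by simp [hy]))

-- A's loop = unconditional modify-loop over the pairs of the in-group samples
lemma pv_foldA_eq (g1 g2 : String) (samples : List (List (String × String)))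
    (init : PySem.Dict String (List String)) :
    samples.foldl (fun d sample =>
        if [g1, g2].contains (pvGrp sample) then
          d.modify (pvGrp sample) [] (fun l => l ++ [pvIdf sample])
        else d) init
    = ((samples.filter (fun s => [g1, g2].contains (pvGrp s))).map pvPair).foldl
        (fun d p => d.modify p.1 [] (fun l => l ++ [p.2])) init := by
  rw [List.foldl_map, List.foldl_filter]
  simp only [pvPair]

lemma pv_filter_pairs (g1 g2 g : String) (samples : List (List (String × String)))
    (hg : g = g1 ∨ g = g2) :
    ((samples.filter (fun s => [g1, g2].contains (pvGrp s))).map pvPair).filter (fun p => p.1 == g)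
    = (samples.map pvPair).filter (fun p => p.1 == g) := by
  rw [List.filter_map, List.filter_map, List.filter_filter]
  congr 1
  apply List.filter_congr
  intro s _
  simp only [Function.comp, pvPair]
  by_cases h : pvGrp s = g
  · subst h
    rcases hg with h | h <;> simp [h]
  · simp [h]

-- the pair-list value at key g is exactly B's filter-and-map comprehension
lemma pv_pairs_filter_eq_ids (g : String) (samples : List (List (String × String))) :
    ((samples.map pvPair).filter (fun p => p.1 == g)).map (fun p => p.2)
    = pvIds samples g := by
  rw [List.filter_map, List.map_map, pvIds]
  congr 1

lemma pv_getD_init (g1 g2 g : String) :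
    (((PySem.Dict.empty.insert g1 ([] : List String)).insert g2 []).getD g []) = [] := by
  simp [PySem.Dict.getD_insert, PySem.Dict.getD_empty]

-- A's dict value at a requested key g is B's identifiers(g)
lemma pv_valA (g1 g2 g : String) (samples : List (List (String × String))) (hg : g = g1 ∨ g = g2) :
    (((samples.filter (fun s => [g1, g2].contains (pvGrp s))).map pvPair).foldl
        (fun d p => d.modify p.1 [] (fun l => l ++ [p.2]))
        ((PySem.Dict.empty.insert g1 []).insert g2 [])).getD g []
    = pvIds samples g := by
  rw [PySem.Dict.getD_foldl_modify_append, pv_filter_pairs g1 g2 g samples hg,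
    pv_getD_init g1 g2 g, pv_pairs_filter_eq_ids]
  rfl

lemma pv_keysA (g1 g2 : String) (samples : List (List (String × String))) :
    (((samples.filter (fun s => [g1, g2].contains (pvGrp s))).map pvPair).foldl
        (fun d p => d.modify p.1 [] (fun l => l ++ [p.2]))
        ((PySem.Dict.empty.insert g1 []).insert g2 [])).keys
    = ((PySem.Dict.empty.insert g1 ([] : List String)).insert g2 []).keys := by
  simp only [PySem.Dict.keys_foldl_modify_key]
  apply pv_update_of_subset
  intro x hx
  simp only [List.mem_map, List.mem_filter] at hx
  obtain ⟨p, ⟨s, ⟨hs, hc⟩, hps⟩, hpx⟩ := hx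
  have : x = g1 ∨ x = g2 := by
    subst hps hpx
    simpa [pvPair, List.contains_eq_mem] using hc
  rcases this with h | h <;>
    simp [h, PySem.Dict.mem_keys_insert, PySem.Dict.keys_empty]

theorem pv_main (g1 g2 : String) (samples : List (List (String × String))) :
    determine_groups_samples g1 g2 samples = determine_groups_samples_alt g1 g2 samples := by
  show (samples.foldl (fun d sample =>
      if [g1, g2].contains (pvGrp sample) then
        d.modify (pvGrp sample) [] (fun l => l ++ [pvIdf sample])
      else d)
      ((PySem.Dict.empty.insert g1 []).insert g2 [])).items
    = ((PySem.Dict.empty.insert g1 (pvIds samples g1)).insert g2 (pvIds samples g2)).items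
  rw [pv_foldA_eq]
  by_cases hgg : g1 = g2
  · -- collapsed dict: a single key g1 = g2
    subst hgg
    have hc1 : ((PySem.Dict.empty.insert g1 ([] : List String)).contains g1) = true :=
      PySem.Dict.contains_insert_self _ _ _
    have hknd : (((samples.filter (fun s => [g1, g1].contains (pvGrp s))).map pvPair).foldl
        (fun d p => d.modify p.1 [] (fun l => l ++ [p.2]))
        ((PySem.Dict.empty.insert g1 []).insert g1 [])).keys.Nodup := by
      rw [pv_keysA, PySem.Dict.keys_insert_of_contains _ _ hc1,
        PySem.Dict.keys_insert_of_not_contains _ _ (PySem.Dict.contains_empty g1)]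
      simp
    rw [PySem.Dict.items_eq_map_keys _ hknd [], pv_keysA,
      PySem.Dict.keys_insert_of_contains _ _ hc1,
      PySem.Dict.keys_insert_of_not_contains _ _ (PySem.Dict.contains_empty g1)]
    simp only [PySem.Dict.keys_empty, List.nil_append, List.map_cons, List.map_nil]
    rw [pv_valA g1 g1 g1 samples (Or.inl rfl)]
    rw [PySem.Dict.insert_insert_self,
      PySem.Dict.items_insert_of_not_contains _ _ (PySem.Dict.contains_empty g1)]
    rfl
  · -- two distinct keys g1 ≠ g2
    have hc2 : ((PySem.Dict.empty.insert g1 ([] : List String)).contains g2) = false := by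
      rw [PySem.Dict.contains_insert]
      simp [PySem.Dict.contains_empty, Ne.symm hgg]
    have hc2' : ((PySem.Dict.empty.insert g1 (pvIds samples g1)).contains g2) = false := by
      rw [PySem.Dict.contains_insert]
      simp [PySem.Dict.contains_empty, Ne.symm hgg]
    have hknd : (((samples.filter (fun s => [g1, g2].contains (pvGrp s))).map pvPair).foldl
        (fun d p => d.modify p.1 [] (fun l => l ++ [p.2]))
        ((PySem.Dict.empty.insert g1 []).insert g2 [])).keys.Nodup := by
      rw [pv_keysA, PySem.Dict.keys_insert_of_not_contains _ _ hc2,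
        PySem.Dict.keys_insert_of_not_contains _ _ (PySem.Dict.contains_empty g1)]
      simp [hgg]
    rw [PySem.Dict.items_eq_map_keys _ hknd [], pv_keysA,
      PySem.Dict.keys_insert_of_not_contains _ _ hc2,
      PySem.Dict.keys_insert_of_not_contains _ _ (PySem.Dict.contains_empty g1),
      PySem.Dict.items_insert_of_not_contains _ _ hc2',
      PySem.Dict.items_insert_of_not_contains _ _ (PySem.Dict.contains_empty g1)]
    simp only [PySem.Dict.keys_empty, List.nil_append, List.map_cons, List.map_nil,
      List.append_assoc, List.cons_append]
    rw [pv_valA g1 g2 g1 samples (Or.inl rfl), pv_valA g1 g2 g2 samples (Or.inr rfl)]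
    rfl

-- ===== VERDICT (by name: the statement is the Claim_ definition above) =====
theorem determine_groups_samples_spec : Claim_equal_determine_groups_samples := by
  intro g1 g2 samples _ _
  unfold Spec_determine_groups_samples
  exact pv_main g1 g2 samples
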